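-- pv_equiv track=rewrite | github.com/simply-sankalp/oompa-loompa | test.py | cv_segment
-- ===== SOURCE A (Python) =====
-- VOWELS = set("aeiou")
--
-- def cv_segment(token):
--     """
--     Segment token into CV/CVC pseudo-syllables.
--     """
--     token = token.lower()
--     syllables = []
--     i = 0
--     n = len(token)
--
--     while i < n:
--         onset = ""
--         nucleus = ""
--         coda = ""
--
--         while i < n and token[i] not in VOWELS and len(onset) < 2:
--             onset += token[i]
--             i += 1
--
--         if i < n and token[i] in VOWELS:
--             nucleus = token[i]
--             i += 1
--         else:
--             break
--
--         if i < n and token[i] not in VOWELS: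
--             coda = token[i]
--             i += 1
--
--         syllables.append(onset + nucleus + coda)
--
--     return syllables
-- ===== SOURCE B (Python) =====
-- VOWELS = set("aeiou")
--
-- def cv_segment(token):
--     """
--     Segment token into CV/CVC pseudo-syllables.
--     """
--     token = token.lower()
--     n = len(token)
--     syllables = []
--     i = 0
--     while i < n:
--         # locate the nucleus: first vowel within the next three characters
--         j = next((k for k, c in enumerate(token[i:i+3]) if c in VOWELS), None)
--         if j is None:
--             break
--         end = i + j + 1
--         if end < n and token[end] not in VOWELS:
--             end += 1
--         syllables.append(token[i:end])
--         i = end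
--     return syllables
-- ===== Notes on version B (the rewrite author's own statement) =====
-- stated objective: simpler
-- what changed: Replaced A's nested-while onset/nucleus/coda character state machine with a single loop that searches for the nucleus (first vowel within the next three characters) and slices the whole syllable out in one step.
import Mathlib
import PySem

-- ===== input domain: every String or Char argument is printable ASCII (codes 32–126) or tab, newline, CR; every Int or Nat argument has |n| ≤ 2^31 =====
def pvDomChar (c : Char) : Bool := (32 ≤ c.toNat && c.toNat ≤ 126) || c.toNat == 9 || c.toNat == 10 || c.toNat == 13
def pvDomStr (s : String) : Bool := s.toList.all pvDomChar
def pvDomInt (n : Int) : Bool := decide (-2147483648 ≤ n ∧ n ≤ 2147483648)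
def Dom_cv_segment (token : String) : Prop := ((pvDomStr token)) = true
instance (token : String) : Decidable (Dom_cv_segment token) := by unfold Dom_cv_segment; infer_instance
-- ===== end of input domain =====

-- B replaces A's char-by-char onset/nucleus/coda state machine by directly searching for the
-- nucleus (the first vowel within the next three characters) and slicing the syllable out;
-- objective: simpler/alternative (same asymptotic cost).

-- ===== PORT A =====
def pvVowel (c : Char) : Bool := c = 'a' || c = 'e' || c = 'i' || c = 'o' || c = 'u'

-- inner `while` of A: consume up to 2 leading non-vowels into `onset`
def cvOnset : List Char → List Char → (List Char × List Char)
  | [], onset => (onset, [])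
  | c :: rest, onset =>
      if ¬ pvVowel c ∧ onset.length < 2 then cvOnset rest (onset ++ [c])
      else (onset, c :: rest)

-- outer `while i < n` of A, fuel = remaining length (each iteration consumes ≥ 1 char)
def cvOuterA : Nat → List Char → List String
  | 0, _ => []
  | fuel+1, rest =>
      let p := cvOnset rest []
      match p.2 with
      | [] => []
      | c :: r2 =>
        if pvVowel c then
          match r2 with
          | d :: r3 =>
              if ¬ pvVowel d then String.ofList (p.1 ++ [c] ++ [d]) :: cvOuterA fuel r3
              else String.ofList (p.1 ++ [c]) :: cvOuterA fuel r2
          | [] => String.ofList (p.1 ++ [c]) :: cvOuterA fuel []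
        else []

def cv_segment (token : String) : List String :=
  let t := (PySem.Str.lower token).toList
  cvOuterA t.length t

-- ===== PORT B =====
-- `next((k for k, c in enumerate(token[i:i+3]) if c in VOWELS), None)`
def cvFindNucleus (rest : List Char) : Option Nat := (rest.take 3).findIdx? pvVowel

def cvOuterB : Nat → List Char → List String
  | 0, _ => []
  | fuel+1, rest =>
      match cvFindNucleus rest with
      | none => []
      | some j =>
        let e := match rest.drop (j+1) with
                 | d :: _ => if ¬ pvVowel d then j + 2 else j + 1
                 | [] => j + 1
        String.ofList (rest.take e) :: cvOuterB fuel (rest.drop e)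

def cv_segment_alt (token : String) : List String :=
  let t := (PySem.Str.lower token).toList
  cvOuterB t.length t

-- ===== PRECONDITION & SPEC =====
def Spec_cv_segment (token : String) (out : List String) : Prop := out = cv_segment_alt token
instance (token : String) (out : List String) : Decidable (Spec_cv_segment token out) := by unfold Spec_cv_segment; infer_instance

-- ===== CLAIM (what is proved, stated in full; the proofs are below) =====
def Claim_equal_cv_segment : Prop := ∀ (token : String), Dom_cv_segment token → Spec_cv_segment token (cv_segment token)

-- ===== LEMMAS AND PROOFS =====
theorem cvOuter_eq (fuel : Nat) : ∀ rest : List Char, cvOuterA fuel rest = cvOuterB fuel rest := by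
  induction fuel with
  | zero => intro rest; rfl
  | succ n ih =>
    intro rest
    match rest with
    | [] => rfl
    | [a] =>
        by_cases ha : pvVowel a <;>
          simp_all [cvOuterA, cvOuterB, cvOnset, cvFindNucleus, List.findIdx?, List.findIdx?.go]
    | [a, b] =>
        by_cases ha : pvVowel a <;> by_cases hb : pvVowel b <;>
          simp_all [cvOuterA, cvOuterB, cvOnset, cvFindNucleus, List.findIdx?, List.findIdx?.go]
    | a :: b :: c :: r =>
        by_cases ha : pvVowel a <;> by_cases hb : pvVowel b <;> by_cases hc : pvVowel c <;>
          rcases r with _ | ⟨d, r'⟩ <;>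
          simp_all [cvOuterA, cvOuterB, cvOnset, cvFindNucleus, List.findIdx?, List.findIdx?.go] <;>
          by_cases hd : pvVowel d <;> simp_all

-- ===== VERDICT (by name: the statement is the Claim_ definition above) =====
theorem cv_segment_spec : Claim_equal_cv_segment := by
  intro token _
  unfold Spec_cv_segment cv_segment cv_segment_alt
  exact cvOuter_eq _ _
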